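-- pv_equiv track=rewrite | github.com/theabm/distributed | distributed/worker.py | convert_args_to_str
-- ===== SOURCE A (Python) =====
-- def convert_args_to_str(args, max_len: int | None = None) -> str:
--     """Convert args to a string, allowing for some arguments to raise
--     exceptions during conversion and ignoring them.
--     """
--     length = 0
--     strs = ["" for i in range(len(args))]
--     for i, arg in enumerate(args):
--         try:
--             sarg = repr(arg)
--         except Exception:
--             sarg = "< could not convert arg to str >"
--         strs[i] = sarg
--         length += len(sarg) + 2
--         if max_len is not None and length > max_len:
--             return "({}".format(", ".join(strs[: i + 1]))[:max_len]
--     else: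
--         return "({})".format(", ".join(strs))
-- ===== SOURCE B (Python) =====
-- def convert_args_to_str(args, max_len: int | None = None) -> str:
--     """Same result as A: convert every arg to its repr first, then locate
--     the truncation point with a separate cumulative-length scan."""
--     def _safe_repr(a):
--         try:
--             return repr(a)
--         except Exception:
--             return "< could not convert arg to str >"
--
--     reprs = [_safe_repr(a) for a in args]
--     if max_len is not None:
--         running = 0
--         for idx, s in enumerate(reprs):
--             running += len(s) + 2
--             if running > max_len:
--                 return ("(" + ", ".join(reprs[: idx + 1]))[:max_len]
--     return "(" + ", ".join(reprs) + ")"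
-- ===== Notes on version B (the rewrite author's own statement) =====
-- stated objective: alternative
-- what changed: A converts and measures inside one loop over a preallocated slot list mutated in place with an early return; B first converts every arg to its repr in a separate pass, then runs a distinct cumulative-length scan to locate the cut index and builds the output once from that index.
import Mathlib
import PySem

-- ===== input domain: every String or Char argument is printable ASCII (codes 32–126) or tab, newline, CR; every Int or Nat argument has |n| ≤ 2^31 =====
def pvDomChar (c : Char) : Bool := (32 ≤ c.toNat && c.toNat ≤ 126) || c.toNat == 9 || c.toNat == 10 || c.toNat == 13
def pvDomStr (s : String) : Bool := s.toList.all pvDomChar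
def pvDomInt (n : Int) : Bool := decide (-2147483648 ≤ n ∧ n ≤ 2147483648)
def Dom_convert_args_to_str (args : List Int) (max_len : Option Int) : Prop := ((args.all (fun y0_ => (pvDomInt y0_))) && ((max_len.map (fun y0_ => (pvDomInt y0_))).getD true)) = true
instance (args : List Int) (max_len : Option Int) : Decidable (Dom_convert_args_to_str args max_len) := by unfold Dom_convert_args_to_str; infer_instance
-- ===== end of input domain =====

-- B replaces A's single loop (preallocated slot list mutated in place, running length
-- checked inside the conversion loop) by two phases: a conversion pass producing all reprs,
-- then a separate cumulative-length scan locating the cut index; objective: alternative decomposition.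

-- ===== PORT A =====
-- A's loop over enumerate(args): strs preallocated with "" and set in place, running length,
-- early return with "({}".format(...)[:max_len] when the length budget is exceeded.
def pvALoop (max_len : Option Int) : List (Int × Int) → Int → List (List Char) → List Char
  | [], _, strs => '(' :: (PySem.Chars.join [',', ' '] strs ++ [')'])
  | (i, arg) :: rest, length, strs =>
    let sarg := PySem.Int.toChars arg       -- repr(arg); int repr never raises
    let strs' := PySem.List.pySetD strs i sarg
    let length' := length + (sarg.length : Int) + 2
    match max_len with
    | some m =>
      if length' > m then
        PySem.List.slice ('(' :: PySem.Chars.join [',', ' '] (PySem.List.slice strs' none (some (i + 1)))) none (some m)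
      else pvALoop max_len rest length' strs'
    | none => pvALoop max_len rest length' strs'

def convert_args_to_str (args : List Int) (max_len : Option Int) : String :=
  String.ofList (pvALoop max_len (PySem.List.enumerate args 0) 0 (List.replicate args.length []))

-- ===== PORT B =====
-- _safe_repr(a): repr of an int (the except branch is unreachable for ints)
def pvSafeRepr (a : Int) : List Char := PySem.Int.toChars a

-- the cumulative-length scan of B: first index where the running total exceeds m
def pvFindCut (m : Int) : List (List Char) → Int → Int → Option Int
  | [], _, _ => none
  | s :: rest, idx, running =>
    let running' := running + (s.length : Int) + 2
    if running' > m then some idx else pvFindCut m rest (idx + 1) running'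

def convert_args_to_str_alt (args : List Int) (max_len : Option Int) : String :=
  let reprs := args.map pvSafeRepr
  match max_len with
  | some m =>
    match pvFindCut m reprs 0 0 with
    | some idx =>
      String.ofList (PySem.List.slice ('(' :: PySem.Chars.join [',', ' '] (PySem.List.slice reprs none (some (idx + 1)))) none (some m))
    | none => String.ofList ('(' :: (PySem.Chars.join [',', ' '] reprs ++ [')']))
  | none => String.ofList ('(' :: (PySem.Chars.join [',', ' '] reprs ++ [')']))

-- ===== PRECONDITION & SPEC =====
def Spec_convert_args_to_str (args : List Int) (max_len : Option Int) (out : String) : Prop := out = convert_args_to_str_alt args max_len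
instance (args : List Int) (max_len : Option Int) (out : String) : Decidable (Spec_convert_args_to_str args max_len out) := by unfold Spec_convert_args_to_str; infer_instance

-- ===== CLAIM (what is proved, stated in full; the proofs are below) =====
def Claim_equal_convert_args_to_str : Prop := ∀ (args : List Int) (max_len : Option Int), Dom_convert_args_to_str args max_len → Spec_convert_args_to_str args max_len (convert_args_to_str args max_len)

-- ===== LEMMAS AND PROOFS =====

theorem pvALoop_none (rest pre : List Int) (len0 : Int) :
    pvALoop none (PySem.List.enumerate rest (pre.length : Int)) len0
        (pre.map PySem.Int.toChars ++ List.replicate rest.length []) =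
      '(' :: (PySem.Chars.join [',', ' '] ((pre ++ rest).map PySem.Int.toChars) ++ [')']) := by
  induction rest generalizing pre len0 with
  | nil => simp [pvALoop, PySem.List.enumerate_nil]
  | cons a rest ih =>
    rw [PySem.List.enumerate_cons]
    have hset : PySem.List.pySetD
        (pre.map PySem.Int.toChars ++ List.replicate (a :: rest).length []) (pre.length : Int)
        (PySem.Int.toChars a) =
        (pre ++ [a]).map PySem.Int.toChars ++ List.replicate rest.length [] := by
      simp [PySem.List.pySetD_natCast, List.replicate_succ, List.set_append_right,
        List.length_map]
    simp only [pvALoop, hset]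
    have := ih (pre ++ [a]) (len0 + ((PySem.Int.toChars a).length : Int) + 2)
    simp only [List.length_append, List.length_cons, List.length_nil] at this ⊢
    push_cast at this
    rw [show ((pre.length : Int) + 1) = (pre.length : Int) + 1 from rfl]
    convert this using 3 <;> simp [List.append_assoc]

theorem pvALoop_some (m : Int) (rest pre : List Int) (len0 : Int) :
    pvALoop (some m) (PySem.List.enumerate rest (pre.length : Int)) len0
        (pre.map PySem.Int.toChars ++ List.replicate rest.length []) =
      (match pvFindCut m (rest.map PySem.Int.toChars) (pre.length : Int) len0 with
       | none => '(' :: (PySem.Chars.join [',', ' '] ((pre ++ rest).map PySem.Int.toChars) ++ [')'])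
       | some idx =>
          PySem.List.slice
            ('(' :: PySem.Chars.join [',', ' ']
              (PySem.List.slice ((pre ++ rest).map PySem.Int.toChars) none (some (idx + 1))))
            none (some m)) := by
  induction rest generalizing pre len0 with
  | nil => simp [pvALoop, pvFindCut, PySem.List.enumerate_nil]
  | cons a rest ih =>
    rw [PySem.List.enumerate_cons]
    have hset : PySem.List.pySetD
        (pre.map PySem.Int.toChars ++ List.replicate (a :: rest).length []) (pre.length : Int)
        (PySem.Int.toChars a) =
        (pre ++ [a]).map PySem.Int.toChars ++ List.replicate rest.length [] := by
      simp [PySem.List.pySetD_natCast, List.replicate_succ, List.set_append_right,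
        List.length_map]
    simp only [pvALoop, hset, List.map_cons, pvFindCut]
    by_cases h : len0 + ((PySem.Int.toChars a).length : Int) + 2 > m
    · simp only [h, if_pos]
      -- both slices pick exactly the first pre.length+1 converted strings
      have hsl1 : PySem.List.slice
          ((pre ++ [a]).map PySem.Int.toChars ++ List.replicate rest.length ([] : List Char))
          none (some ((pre.length : Int) + 1)) = (pre ++ [a]).map PySem.Int.toChars := by
        have : ((pre.length : Int) + 1) = ((pre.length + 1 : Nat) : Int) := by push_cast; ring
        rw [this, PySem.List.slice_to_natCast]
        rw [show pre.length + 1 = (pre.map PySem.Int.toChars).length + 1 by simp,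
          List.take_append]
        simp
      have hsl2 : PySem.List.slice ((pre ++ a :: rest).map PySem.Int.toChars)
          none (some ((pre.length : Int) + 1)) = (pre ++ [a]).map PySem.Int.toChars := by
        have : ((pre.length : Int) + 1) = ((pre.length + 1 : Nat) : Int) := by push_cast; ring
        rw [this, PySem.List.slice_to_natCast]
        have : (pre ++ a :: rest).map PySem.Int.toChars =
            (pre ++ [a]).map PySem.Int.toChars ++ rest.map PySem.Int.toChars := by
          simp
        rw [this, List.take_append_of_le_length (by simp)]
        simp
      rw [hsl1, hsl2]
    · simp only [h, if_neg, not_false_iff]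
      have := ih (pre ++ [a]) (len0 + ((PySem.Int.toChars a).length : Int) + 2)
      simp only [List.length_append, List.length_cons, List.length_nil] at this ⊢
      push_cast at this
      convert this using 3 <;> simp [List.append_assoc]

-- ===== VERDICT (by name: the statement is the Claim_ definition above) =====
theorem convert_args_to_str_spec : Claim_equal_convert_args_to_str := by
  intro args max_len _
  unfold Spec_convert_args_to_str convert_args_to_str convert_args_to_str_alt pvSafeRepr
  cases max_len with
  | none =>
    have := pvALoop_none args [] 0
    simpa using congrArg String.ofList this
  | some m =>
    have := pvALoop_some m args [] 0
    simp only [List.nil_append, List.length_nil, Nat.cast_zero, List.map_nil] at this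
    rw [this]
    cases h : pvFindCut m (args.map PySem.Int.toChars) 0 0 <;> simp [h]
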